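-- pv_equiv track=rewrite | github.com/BenjaminLTakaki/GuitarTranscription | generate_sf2.py | _string_for_midi
-- ===== SOURCE A (Python) =====
-- from typing import List, Tuple
--
-- GUITAR_TUNING = (40, 45, 50, 55, 59, 64)
--
-- NUM_FRETS = 21  # 0–20
--
-- def _string_for_midi(midi: int) -> Tuple[int, int] | None:
--     candidates = []
--     for s, open_m in enumerate(GUITAR_TUNING):
--         fret = midi - open_m
--         if 0 <= fret < NUM_FRETS:
--             candidates.append((s, fret))
--     if not candidates:
--         return None
--     return sorted(candidates, key=lambda x: x[1])[0]
-- ===== SOURCE B (Python) =====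
-- GUITAR_TUNING = (40, 45, 50, 55, 59, 64)
--
-- NUM_FRETS = 21  # 0-20
--
-- def _string_for_midi(midi):
--     best = None
--     for s, open_m in enumerate(GUITAR_TUNING):
--         fret = midi - open_m
--         if 0 <= fret < NUM_FRETS and (best is None or fret < best[1]):
--             best = (s, fret)
--     return best
-- ===== Notes on version B (the rewrite author's own statement) =====
-- stated objective: simpler
-- what changed: Replaced collect-candidates-then-sort-and-take-first with a single pass that tracks the running minimum-fret (string, fret) pair.
import Mathlib
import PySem

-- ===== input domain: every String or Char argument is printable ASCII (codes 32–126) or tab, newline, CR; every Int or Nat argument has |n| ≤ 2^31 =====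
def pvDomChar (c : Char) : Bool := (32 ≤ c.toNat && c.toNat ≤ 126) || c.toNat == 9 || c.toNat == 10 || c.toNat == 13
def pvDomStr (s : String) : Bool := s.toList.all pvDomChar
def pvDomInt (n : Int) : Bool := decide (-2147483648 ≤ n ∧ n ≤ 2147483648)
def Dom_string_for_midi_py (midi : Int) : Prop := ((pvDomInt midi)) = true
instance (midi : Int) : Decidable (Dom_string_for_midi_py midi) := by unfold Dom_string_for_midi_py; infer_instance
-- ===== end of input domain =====

-- B replaces A's collect-candidates-then-sort-and-take-first with a single pass tracking the running minimum-fret (string, fret) pair (objective: simpler).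

-- ===== PORT A =====
def pvGuitarTuning : List Int := [40, 45, 50, 55, 59, 64]

def pvNumFrets : Int := 21

def string_for_midi_py (midi : Int) : Option (Int × Int) :=
  let candidates := (PySem.List.enumerate pvGuitarTuning).foldl
    (fun (acc : List (Int × Int)) p =>
      let fret := midi - p.2
      if 0 ≤ fret ∧ fret < pvNumFrets then acc ++ [(p.1, fret)] else acc) []
  if candidates = [] then none
  else
    match PySem.List.sorted candidates (fun x => x.2) false with
    | [] => none   -- unreachable: candidates ≠ []
    | x :: _ => some x

-- ===== PORT B =====
def string_for_midi_py_alt (midi : Int) : Option (Int × Int) :=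
  (PySem.List.enumerate pvGuitarTuning).foldl
    (fun (best : Option (Int × Int)) p =>
      let fret := midi - p.2
      if 0 ≤ fret ∧ fret < pvNumFrets then
        match best with
        | none => some (p.1, fret)
        | some b => if fret < b.2 then some (p.1, fret) else best
      else best) none

-- ===== PRECONDITION & SPEC =====
def Spec_string_for_midi_py (midi : Int) (out : Option (Int × Int)) : Prop := out = string_for_midi_py_alt midi
instance (midi : Int) (out : Option (Int × Int)) : Decidable (Spec_string_for_midi_py midi out) := by unfold Spec_string_for_midi_py; infer_instance

-- ===== CLAIM (what is proved, stated in full; the proofs are below) =====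
def Claim_equal_string_for_midi_py : Prop := ∀ (midi : Int), Dom_string_for_midi_py midi → Spec_string_for_midi_py midi (string_for_midi_py midi)

-- ===== LEMMAS AND PROOFS =====

-- ===== VERDICT (by name: the statement is the Claim_ definition above) =====
theorem string_for_midi_py_spec : Claim_equal_string_for_midi_py := by
  intro midi _
  unfold Spec_string_for_midi_py
  by_cases h : 40 ≤ midi ∧ midi ≤ 84
  · obtain ⟨h1, h2⟩ := h
    interval_cases midi <;> decide
  · -- out of range: both sides return none
    unfold string_for_midi_py string_for_midi_py_alt
    simp only [pvGuitarTuning, pvNumFrets, PySem.List.enumerate_cons,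
      PySem.List.enumerate_nil, List.foldl]
    rw [if_neg (by omega : ¬(0 ≤ midi - 40 ∧ midi - 40 < 21)),
        if_neg (by omega : ¬(0 ≤ midi - 45 ∧ midi - 45 < 21)),
        if_neg (by omega : ¬(0 ≤ midi - 50 ∧ midi - 50 < 21)),
        if_neg (by omega : ¬(0 ≤ midi - 55 ∧ midi - 55 < 21)),
        if_neg (by omega : ¬(0 ≤ midi - 59 ∧ midi - 59 < 21)),
        if_neg (by omega : ¬(0 ≤ midi - 64 ∧ midi - 64 < 21)),
        if_neg (by omega : ¬(0 ≤ midi - 40 ∧ midi - 40 < 21)),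
        if_neg (by omega : ¬(0 ≤ midi - 45 ∧ midi - 45 < 21)),
        if_neg (by omega : ¬(0 ≤ midi - 50 ∧ midi - 50 < 21)),
        if_neg (by omega : ¬(0 ≤ midi - 55 ∧ midi - 55 < 21)),
        if_neg (by omega : ¬(0 ≤ midi - 59 ∧ midi - 59 < 21)),
        if_neg (by omega : ¬(0 ≤ midi - 64 ∧ midi - 64 < 21))]
    rfl
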